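-- pv_equiv track=rewrite | github.com/SmilingBytes/Competitive-Programming | Codechef/SEPT-19/test.py | combinations
-- ===== SOURCE A (Python) =====
-- def combinations(iterable, r):
--     pool = tuple(iterable)
--     n = len(pool)
--     if r > n:
--         return
--     indices = [i for i in range(r)]
--     yt = set()
--     for i in range(r):
--         if pool[i] in yt:
--             break
--         else:
--             yt.add(pool[i])
--     if (len(yt) == r):
--         yield 1
--     while True:
--         for i in reversed(range(r)):
--             if indices[i] != i + n - r:
--                 break
--         else:
--             return
--         indices[i] += 1
--         for j in range(i+1, r):
--             indices[j] = indices[j - 1] + 1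
--         yt = set()
--         for i in indices:
--             if pool[i] in yt:
--                 break
--             else:
--                 yt.add(pool[i])
--         if (len(yt) == r):
--             yield 1
-- ===== SOURCE B (Python) =====
-- def combinations(iterable, r):
--     # take/skip backtracking over positions, pruning branches whose chosen values repeat
--     pool = list(iterable)
--     n = len(pool)
--
--     def rec(start, chosen):
--         if len(chosen) == r:
--             return [1]
--         if start < n:
--             out = []
--             if pool[start] not in chosen:
--                 out += rec(start + 1, chosen + [pool[start]])
--             out += rec(start + 1, chosen)
--             return out
--         return []
--
--     if r < 0 or r > n:
--         return []
--     return rec(0, [])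
-- ===== Notes on version B (the rewrite author's own statement) =====
-- stated objective: alternative
-- what changed: Replaces the iterative lexicographic index-successor loop (which generates every C(n,r) index tuple and re-checks distinctness of the full tuple each time) with a recursive take/skip backtracking search that carries the chosen values and prunes a branch as soon as a value repeats.
import Mathlib
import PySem

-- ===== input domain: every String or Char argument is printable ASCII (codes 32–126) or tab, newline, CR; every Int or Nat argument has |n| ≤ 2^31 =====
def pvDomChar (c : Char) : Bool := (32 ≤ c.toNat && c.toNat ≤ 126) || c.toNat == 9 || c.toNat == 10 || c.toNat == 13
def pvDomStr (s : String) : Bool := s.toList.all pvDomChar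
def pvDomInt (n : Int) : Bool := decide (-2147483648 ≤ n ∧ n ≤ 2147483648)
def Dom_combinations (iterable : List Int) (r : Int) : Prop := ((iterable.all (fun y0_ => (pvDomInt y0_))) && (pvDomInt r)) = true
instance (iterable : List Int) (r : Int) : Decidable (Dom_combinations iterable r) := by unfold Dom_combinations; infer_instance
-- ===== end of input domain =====

-- B replaces A's lexicographic index-successor loop by a recursive take/skip backtracking
-- search that prunes branches with a repeated value (objective: alternative algorithm).
-- A is a Python generator; its port is the list of all values it yields.

-- ===== PORT A =====

-- the duplicate-scanning loop 'yt = set(); for i in idxs: if pool[i] in yt: break; else: yt.add(pool[i])'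
def pvA_yt (pool : List Int) : PySem.Set Int → List Int → PySem.Set Int
  | yt, [] => yt
  | yt, i :: rest =>
    if PySem.Set.contains yt (PySem.List.pyGetD pool i 0) then yt
    else pvA_yt pool (PySem.Set.add yt (PySem.List.pyGetD pool i 0)) rest
-- (pool[i] is read with pyGetD: every index the Python reads is in range, see the proofs)

-- 'for i in reversed(range(r)): if indices[i] != i + n - r: break; else: return' — the break index
def pvA_find (indices : List Int) (n r : Int) : Option Int :=
  ((PySem.List.pyRange 0 r 1).reverse).find? (fun i => decide (PySem.List.pyGetD indices i 0 ≠ i + n - r))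

-- 'indices[i] += 1; for j in range(i+1, r): indices[j] = indices[j-1] + 1'
def pvA_step (indices : List Int) (r i : Int) : List Int :=
  let ind1 := PySem.List.pySetD indices i (PySem.List.pyGetD indices i 0 + 1)
  (PySem.List.pyRange (i+1) r 1).foldl
    (fun ind j => PySem.List.pySetD ind j (PySem.List.pyGetD ind (j-1) 0 + 1)) ind1

-- the 'while True' loop; fuel is a totality guard only (2^n bounds the number of index tuples,
-- proved sufficient below), each fuel step is exactly one iteration of the Python loop
def pvA_loop (pool : List Int) (n r : Int) : List Int → Nat → List Int
  | _, 0 => []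
  | indices, fuel+1 =>
    match pvA_find indices n r with
    | none => []
    | some i =>
      let indices' := pvA_step indices r i
      let yt := pvA_yt pool PySem.Set.empty indices'
      (if PySem.Set.len yt = r then [1] else []) ++ pvA_loop pool n r indices' fuel

def combinations (iterable : List Int) (r : Int) : List Int :=
  let pool := iterable
  let n : Int := (pool.length : Int)
  if r > n then []
  else
    let indices := PySem.List.pyRange 0 r 1
    let yt := pvA_yt pool PySem.Set.empty (PySem.List.pyRange 0 r 1)
    (if PySem.Set.len yt = r then [1] else []) ++ pvA_loop pool n r indices (2 ^ pool.length)

-- ===== PORT B =====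

def pvB_rec (pool : List Int) (r : Int) (start : Nat) (chosen : List Int) : List Int :=
  if (chosen.length : Int) = r then [1]
  else if h : start < pool.length then
    (if chosen.contains pool[start] then [] else pvB_rec pool r (start+1) (chosen ++ [pool[start]]))
      ++ pvB_rec pool r (start+1) chosen
  else []
termination_by pool.length - start

def combinations_alt (iterable : List Int) (r : Int) : List Int :=
  let pool := iterable
  let n : Int := (pool.length : Int)
  if r < 0 ∨ r > n then [] else pvB_rec pool r 0 []

-- ===== PRECONDITION & SPEC =====
def Spec_combinations (iterable : List Int) (r : Int) (out : List Int) : Prop := out = combinations_alt iterable r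
instance (iterable : List Int) (r : Int) (out : List Int) : Decidable (Spec_combinations iterable r out) := by unfold Spec_combinations; infer_instance

-- ===== CLAIM (what is proved, stated in full; the proofs are below) =====
def Claim_equal_combinations : Prop := ∀ (iterable : List Int) (r : Int), Dom_combinations iterable r → Spec_combinations iterable r (combinations iterable r)

-- ===== LEMMAS AND PROOFS =====

theorem pvGap (t : List Int) (ht : t.Pairwise (· < ·)) :
    ∀ (j d : Nat), j + d < t.length → t.getD j 0 + (d : Int) ≤ t.getD (j + d) 0 := by
  intro j d
  induction d with
  | zero => intro h; simp
  | succ d ih =>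
    intro h
    have h' : j + d < t.length := by omega
    have hstep : t.getD (j+d) 0 < t.getD (j+d+1) 0 := by
      rw [List.getD_eq_getElem _ _ h', List.getD_eq_getElem _ _ (by omega)]
      exact (List.pairwise_iff_getElem.mp ht) _ _ h' (by omega) (by omega)
    have := ih h'
    have harr : j + (d+1) = (j + d) + 1 := by omega
    rw [harr]
    push_cast
    omega

theorem pvLe_pointwise (a : List Int) : ∀ (b : List Int), a.length = b.length →
    (∀ j, j < a.length → a.getD j 0 ≤ b.getD j 0) → a = b ∨ a < b := by
  induction a with
  | nil => intro b hb _; cases b with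
    | nil => exact Or.inl rfl
    | cons x xs => simp at hb
  | cons x xs ih =>
    intro b hb h
    cases b with
    | nil => simp at hb
    | cons y ys =>
      have h0 := h 0 (by simp)
      simp only [List.getD_cons_zero] at h0
      rcases lt_or_eq_of_le h0 with hlt | heq
      · exact Or.inr (List.cons_lt_cons_iff.mpr (Or.inl hlt))
      · have htl : xs = ys ∨ xs < ys := by
          refine ih ys (by simpa using hb) ?_
          intro j hj
          have := h (j+1) (by simpa using hj)
          simpa using this
        rcases htl with heq2 | hlt2
        · exact Or.inl (by rw [heq, heq2])
        · exact Or.inr (List.cons_lt_cons_iff.mpr (Or.inr ⟨heq, hlt2⟩))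

theorem pvLt_elim (a : List Int) : ∀ (b : List Int), a.length = b.length → a < b →
    ∃ p, p < a.length ∧ (∀ j, j < p → a.getD j 0 = b.getD j 0) ∧ a.getD p 0 < b.getD p 0 := by
  induction a with
  | nil => intro b hb h; cases b with
    | nil => exact absurd h (lt_irrefl _)
    | cons y ys => simp at hb
  | cons x xs ih =>
    intro b hb h
    cases b with
    | nil => simp at hb
    | cons y ys =>
      rcases List.cons_lt_cons_iff.mp h with hxy | ⟨hxy, htl⟩
      · exact ⟨0, by simp, by omega, by simpa using hxy⟩
      · obtain ⟨p, hp, hpre, hstr⟩ := ih ys (by simpa using hb) htl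
        refine ⟨p+1, by simpa using hp, ?_, by simpa using hstr⟩
        intro j hj
        cases j with
        | zero => simpa using hxy
        | succ j' => simpa using hpre j' (by omega)

theorem pvLt_intro (a b : List Int) : ∀ (p : Nat), p < a.length → p < b.length →
    (∀ j, j < p → a.getD j 0 = b.getD j 0) → a.getD p 0 < b.getD p 0 → a < b := by
  induction a generalizing b with
  | nil => intro p hpa; simp at hpa
  | cons x xs ih =>
    intro p hpa hpb hpre hp
    cases b with
    | nil => simp at hpb
    | cons y ys =>
      cases p with
      | zero => exact List.cons_lt_cons_iff.mpr (Or.inl (by simpa using hp))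
      | succ p' =>
        have hxy : x = y := by simpa using hpre 0 (by omega)
        refine List.cons_lt_cons_iff.mpr (Or.inr ⟨hxy, ih ys p' (by simpa using hpa) (by simpa using hpb) ?_ (by simpa using hp)⟩)
        intro j hj
        simpa using hpre (j+1) (by omega)

def pvVal (pool : List Int) (i : Int) : Int := PySem.List.pyGetD pool i 0

def pvGood (pool : List Int) : List Int → List Int → Bool
  | _, [] => true
  | chosen, i :: t => (!chosen.contains (pvVal pool i)) && pvGood pool (chosen ++ [pvVal pool i]) t

def pvHFind (indices : List Int) (n r : Int) : Nat → Option Int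
  | 0 => none
  | m+1 => if PySem.List.pyGetD indices (m : Int) 0 ≠ (m : Int) + n - r then some (m : Int)
           else pvHFind indices n r m

theorem pvA_yt_good (pool : List Int) : ∀ (l yt : List Int), pvGood pool yt l = true →
    (pvA_yt pool yt l).length = yt.length + l.length := by
  intro l
  induction l with
  | nil => intro yt _; simp [pvA_yt]
  | cons i rest ih =>
    intro yt h
    rw [pvGood] at h
    simp only [Bool.and_eq_true, Bool.not_eq_true'] at h
    obtain ⟨hc, hg⟩ := h
    rw [pvA_yt]
    have hcs : PySem.Set.contains yt (PySem.List.pyGetD pool i 0) = false := by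
      simpa [pvVal] using hc
    rw [hcs]
    simp only [if_false, Bool.false_eq_true]
    have hnm : pvVal pool i ∉ yt := by
      intro hmem
      have := (PySem.Set.contains_iff yt (pvVal pool i)).mpr hmem
      simp only [pvVal] at this
      rw [this] at hcs
      exact absurd hcs (by simp)
    rw [show PySem.Set.add yt (PySem.List.pyGetD pool i 0) = yt ++ [pvVal pool i] from PySem.Set.add_of_not_mem hnm]
    rw [ih _ (by simpa using hg)]
    simp; omega

theorem pvA_yt_bad (pool : List Int) : ∀ (l yt : List Int), pvGood pool yt l = false →
    (pvA_yt pool yt l).length < yt.length + l.length := by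
  intro l
  induction l with
  | nil => intro yt h; simp [pvGood] at h
  | cons i rest ih =>
    intro yt h
    rw [pvGood] at h
    rw [pvA_yt]
    by_cases hc : PySem.Set.contains yt (PySem.List.pyGetD pool i 0) = true
    · rw [hc]; simp
    · have hcs : PySem.Set.contains yt (PySem.List.pyGetD pool i 0) = false := by
        simpa using hc
      rw [hcs]
      simp only [if_false, Bool.false_eq_true]
      have hnm : pvVal pool i ∉ yt := by
        simp only [pvVal]
        intro hmem
        exact hc ((PySem.Set.contains_iff yt (PySem.List.pyGetD pool i 0)).mpr hmem)
      rw [show PySem.Set.add yt (PySem.List.pyGetD pool i 0) = yt ++ [pvVal pool i] from PySem.Set.add_of_not_mem hnm]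
      have hg : pvGood pool (yt ++ [pvVal pool i]) rest = false := by
        rcases Bool.and_eq_false_iff.mp h with h1 | h2
        · exfalso
          have h1' : yt.contains (pvVal pool i) = true := by
            simpa using h1
          have hmem : pvVal pool i ∈ yt := by simpa using h1'
          exact hnm hmem
        · exact h2
      have := ih _ hg
      simp at this ⊢
      omega

theorem pvCond_iff (pool : List Int) (s : List Int) (r' : Nat) (hs : s.length = r') :
    (PySem.Set.len (pvA_yt pool PySem.Set.empty s) = (r' : Int)) ↔ pvGood pool [] s = true := by
  have hlen : PySem.Set.len (pvA_yt pool PySem.Set.empty s) = ((pvA_yt pool PySem.Set.empty s).length : Int) := by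
    simp [PySem.Set.len]
  rw [hlen]
  cases hg : pvGood pool ([] : List Int) s with
  | true =>
    have h2 : (pvA_yt pool PySem.Set.empty s).length = ([] : List Int).length + s.length :=
      pvA_yt_good pool s PySem.Set.empty (by simpa [PySem.Set.empty] using hg)
    simp only [List.length_nil, Nat.zero_add] at h2
    rw [h2, hs]
    simp
  | false =>
    have h2 : (pvA_yt pool PySem.Set.empty s).length < ([] : List Int).length + s.length :=
      pvA_yt_bad pool s PySem.Set.empty (by simpa [PySem.Set.empty] using hg)
    simp only [List.length_nil, Nat.zero_add] at h2
    constructor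
    · intro h; exfalso; rw [hs] at h2; omega
    · intro h; simp at h

theorem pvFind_aux (s : List Int) (n r : Int) : ∀ (m : Nat),
    ((PySem.List.pyRange 0 (m : Int) 1).reverse).find? (fun i => decide (PySem.List.pyGetD s i 0 ≠ i + n - r)) = pvHFind s n r m := by
  intro m
  induction m with
  | zero => simp [PySem.List.pyRange_zero_nat, pvHFind]
  | succ m ih =>
    have : PySem.List.pyRange 0 ((m+1 : Nat) : Int) 1 = PySem.List.pyRange 0 (m : Int) 1 ++ [(m : Int)] := by
      push_cast
      exact PySem.List.pyRange_one_succ_right (by positivity)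
    rw [this, List.reverse_append]
    simp only [List.reverse_cons, List.reverse_nil, List.nil_append, List.singleton_append]
    rw [pvHFind]
    by_cases hp : PySem.List.pyGetD s (m : Int) 0 ≠ (m : Int) + n - r
    · rw [if_pos hp, List.find?_cons_of_pos (h := by simpa using hp)]
    · rw [if_neg hp, List.find?_cons_of_neg (h := by simpa using hp), ih]

theorem pvFind_eq_hfind (s : List Int) (n : Int) (r' : Nat) :
    pvA_find s n (r' : Int) = pvHFind s n (r' : Int) r' := by
  rw [pvA_find]
  exact pvFind_aux s n (r' : Int) r'

theorem pvHFind_none (s : List Int) (n r : Int) : ∀ (m : Nat), pvHFind s n r m = none →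
    ∀ j, j < m → PySem.List.pyGetD s (j : Int) 0 = (j : Int) + n - r := by
  intro m
  induction m with
  | zero => intro _ j hj; omega
  | succ m ih =>
    intro h j hj
    rw [pvHFind] at h
    by_cases hp : PySem.List.pyGetD s (m : Int) 0 ≠ (m : Int) + n - r
    · rw [if_pos hp] at h; exact absurd h (by simp)
    · rw [if_neg hp] at h
      rw [ne_eq, not_not] at hp
      rcases Nat.lt_succ_iff_lt_or_eq.mp hj with hlt | heq
      · exact ih h j hlt
      · rw [heq]; exact hp

theorem pvHFind_some (s : List Int) (n r : Int) : ∀ (m : Nat) (i : Int), pvHFind s n r m = some i →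
    ∃ i' : Nat, i = (i' : Int) ∧ i' < m ∧ PySem.List.pyGetD s (i' : Int) 0 ≠ (i' : Int) + n - r ∧
      ∀ j : Nat, i' < j → j < m → PySem.List.pyGetD s (j : Int) 0 = (j : Int) + n - r := by
  intro m
  induction m with
  | zero => intro i h; simp [pvHFind] at h
  | succ m ih =>
    intro i h
    rw [pvHFind] at h
    by_cases hp : PySem.List.pyGetD s (m : Int) 0 ≠ (m : Int) + n - r
    · rw [if_pos hp] at h
      refine ⟨m, (Option.some_inj.mp h).symm, by omega, hp, ?_⟩
      intro j h1 h2; omega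
    · rw [if_neg hp] at h
      rw [ne_eq, not_not] at hp
      obtain ⟨i', hi, him, hne, hmax⟩ := ih i h
      refine ⟨i', hi, by omega, hne, ?_⟩
      intro j h1 h2
      rcases Nat.lt_succ_iff_lt_or_eq.mp h2 with hlt | heq
      · exact hmax j h1 hlt
      · rw [heq]; exact hp

def pvCombs (pool : List Int) (start : Nat) (k : Nat) : List (List Int) :=
  match k with
  | 0 => [[]]
  | k'+1 =>
    if h : start < pool.length then
      ((pvCombs pool (start+1) k').map ((start : Int) :: ·)) ++ pvCombs pool (start+1) (k'+1)
    else []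
termination_by pool.length - start

theorem pvCombs_zero (pool : List Int) (start : Nat) : pvCombs pool start 0 = [[]] := by
  rw [pvCombs]

theorem mem_pvCombs (pool : List Int) : ∀ (start k : Nat) (t : List Int),
    t ∈ pvCombs pool start k ↔
      (t.length = k ∧ t.Pairwise (· < ·) ∧ ∀ x ∈ t, (start : Int) ≤ x ∧ x < (pool.length : Int)) := by
  intro start k
  fun_induction pvCombs pool start k with
  | case1 =>
    intro t
    simp only [List.mem_singleton]
    constructor
    · rintro rfl; simp
    · rintro ⟨h1, _, _⟩; exact List.eq_nil_of_length_eq_zero h1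
  | case2 start k' h ih1 ih2 =>
    intro t
    rw [List.mem_append, List.mem_map]
    constructor
    · rintro (⟨t', ht', rfl⟩ | ht)
      · obtain ⟨hl, hp, hb⟩ := (ih1 t').mp ht'
        refine ⟨by simp [hl], ?_, ?_⟩
        · rw [List.pairwise_cons]
          refine ⟨fun y hy => ?_, hp⟩
          have := (hb y hy).1
          push_cast at this ⊢
          omega
        · intro x hx
          rcases List.mem_cons.mp hx with rfl | hx'
          · constructor
            · exact le_refl _
            · exact_mod_cast h
          · have := hb x hx'
            push_cast at this ⊢
            omega
      · obtain ⟨hl, hp, hb⟩ := (ih2 t).mp ht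
        refine ⟨hl, hp, fun x hx => ?_⟩
        have := hb x hx
        push_cast at this ⊢
        omega
    · rintro ⟨hl, hp, hb⟩
      cases t with
      | nil => simp at hl
      | cons x t' =>
        have hbx := hb x (by simp)
        by_cases hx : x = (start : Int)
        · subst hx
          left
          refine ⟨t', (ih1 t').mpr ⟨by simpa using hl, (List.pairwise_cons.mp hp).2, ?_⟩, rfl⟩
          intro y hy
          have hlt := (List.pairwise_cons.mp hp).1 y hy
          have := hb y (by simp [hy])
          push_cast at this ⊢
          omega
        · right
          refine (ih2 _).mpr ⟨hl, hp, ?_⟩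
          intro y hy
          rcases List.mem_cons.mp hy with rfl | hy'
          · push_cast at hbx ⊢
            omega
          · have hlt := (List.pairwise_cons.mp hp).1 y hy'
            have := hb y (by simp [hy'])
            push_cast at hbx this ⊢
            omega
  | case3 start k' h =>
    intro t
    constructor
    · intro ht; simp at ht
    · rintro ⟨hl, hp, hb⟩
      cases t with
      | nil => simp at hl
      | cons x t' =>
        have := hb x (by simp)
        have hn : (pool.length : Int) ≤ (start : Int) := by
          push_cast
          omega
        omega

theorem pvCombs_sorted (pool : List Int) : ∀ (start k : Nat),
    (pvCombs pool start k).Pairwise (· < ·) := by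
  intro start k
  fun_induction pvCombs pool start k with
  | case1 => simp
  | case2 start k' h ih1 ih2 =>
    rw [List.pairwise_append]
    refine ⟨?_, ih2, ?_⟩
    · rw [List.pairwise_map]
      exact ih1.imp (fun hab => List.cons_lt_cons_iff.mpr (Or.inr ⟨rfl, hab⟩))
    · rintro a ha b hb
      obtain ⟨a', _, rfl⟩ := List.mem_map.mp ha
      obtain ⟨hl, _, hbnd⟩ := (mem_pvCombs pool (start+1) (k'+1) b).mp hb
      cases b with
      | nil => simp at hl
      | cons y ys =>
        have := (hbnd y (by simp)).1
        refine List.cons_lt_cons_iff.mpr (Or.inl ?_)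
        push_cast at this ⊢
        omega
  | case3 start k' h => simp

theorem pvCombs_len_le (pool : List Int) : ∀ (start k : Nat),
    (pvCombs pool start k).length ≤ 2 ^ (pool.length - start) := by
  intro start k
  fun_induction pvCombs pool start k with
  | case1 => simpa using Nat.one_le_two_pow
  | case2 start k' h ih1 ih2 =>
    rw [List.length_append, List.length_map]
    have hps : pool.length - start = (pool.length - (start+1)) + 1 := by omega
    rw [hps, pow_succ]
    omega
  | case3 start k' h => simp

theorem pvStep_aux (s : List Int) (r' i : Nat) (hs : s.length = r') (hi : i < r') :
    ∀ m : Nat, i + 1 + m ≤ r' →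
      (PySem.List.pyRange ((i : Int)+1) ((i : Int)+1+(m : Int)) 1).foldl
          (fun ind j => PySem.List.pySetD ind j (PySem.List.pyGetD ind (j-1) 0 + 1))
          (PySem.List.pySetD s (i : Int) (PySem.List.pyGetD s (i : Int) 0 + 1)) =
        s.take i ++ (List.range (m+1)).map (fun q : Nat => s.getD i 0 + 1 + (q : Int)) ++ s.drop (i+1+m) := by
  intro m
  induction m with
  | zero =>
    intro _
    rw [show ((i : Int)+1+(0:Nat) : Int) = (i : Int)+1 by push_cast; ring]
    rw [PySem.List.pyRange_one_eq_nil (le_refl _)]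
    rw [List.foldl_nil]
    rw [PySem.List.pySetD_natCast, PySem.List.pyGetD_natCast]
    rw [List.set_eq_take_append_cons_drop]
    rw [if_pos (by omega)]
    simp
  | succ m ih =>
    intro hm
    have hm' : i + 1 + m ≤ r' := by omega
    have hsplit : PySem.List.pyRange ((i : Int)+1) ((i : Int)+1+((m+1 : Nat) : Int)) 1 =
        PySem.List.pyRange ((i : Int)+1) ((i : Int)+1+(m : Int)) 1 ++ [((i+1+m : Nat) : Int)] := by
      rw [show ((i : Int)+1+((m+1 : Nat) : Int)) = ((i : Int)+1+(m : Int)) + 1 by push_cast; ring]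
      rw [PySem.List.pyRange_one_succ_right (by push_cast; omega)]
      norm_cast
    rw [hsplit, List.foldl_append, ih hm', List.foldl_cons, List.foldl_nil]
    set T := s.take i with hT
    set M := (List.range (m+1)).map (fun q : Nat => s.getD i 0 + 1 + (q : Int)) with hM
    have hTlen : T.length = i := by rw [hT]; rw [List.length_take]; omega
    have hMlen : M.length = m + 1 := by rw [hM]; simp
    have hread : PySem.List.pyGetD (T ++ M ++ s.drop (i+1+m)) (((i+1+m : Nat) : Int) - 1) 0
        = s.getD i 0 + 1 + (m : Int) := by
      rw [show (((i+1+m : Nat) : Int) - 1) = ((i+m : Nat) : Int) by push_cast; ring]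
      rw [PySem.List.pyGetD_natCast]
      rw [List.getD_append _ _ _ _ (by rw [List.length_append, hTlen, hMlen]; omega)]
      rw [List.getD_append_right _ _ _ _ (by omega)]
      rw [hTlen, hM]
      have : i + m - i = m := by omega
      rw [this]
      rw [List.getD_eq_getElem _ _ (by simp)]
      simp only [List.getElem_map, List.getElem_range]
    rw [hread]
    rw [PySem.List.pySetD_natCast]
    have hset : (T ++ M ++ s.drop (i+1+m)).set (i+1+m) (s.getD i 0 + 1 + (m : Int) + 1)
        = T ++ ((List.range (m+2)).map (fun q : Nat => s.getD i 0 + 1 + (q : Int))) ++ s.drop (i+1+(m+1)) := by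
      have hdrop : s.drop (i+1+m) = s[i+1+m]'(by omega) :: s.drop (i+1+(m+1)) := by
        rw [List.drop_eq_getElem_cons (by omega)]
        have harr : i + 1 + m + 1 = i + 1 + (m + 1) := by omega
        rw [harr]
      rw [hdrop]
      rw [List.set_append_right _ _ (by rw [List.length_append, hTlen, hMlen]; omega)]
      rw [List.length_append, hTlen, hMlen]
      have : i + 1 + m - (i + (m+1)) = 0 := by omega
      rw [this, List.set_cons_zero]
      rw [show List.range (m+2) = List.range (m+1) ++ [m+1] from List.range_succ]
      rw [List.map_append, ← hM]
      simp only [List.map_cons, List.map_nil]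
      simp only [List.append_assoc, List.singleton_append, List.cons_append, List.nil_append]
      congr 3
      push_cast
      ring
    rw [hset]

theorem pvStep_spec (s : List Int) (r' i : Nat) (hs : s.length = r') (hi : i < r') :
    pvA_step s (r' : Nat) (i : Nat) =
      s.take i ++ (List.range (r' - i)).map (fun q : Nat => s.getD i 0 + 1 + (q : Int)) := by
  rw [pvA_step]
  have hend : ((r' : Nat) : Int) = (i : Int) + 1 + ((r' - (i+1) : Nat) : Int) := by push_cast; omega
  rw [hend]
  have := pvStep_aux s r' i hs hi (r' - (i+1)) (by omega)
  rw [this]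
  have hdrop : s.drop (i+1+(r' - (i+1))) = [] := by
    apply List.drop_eq_nil_of_le
    omega
  rw [hdrop, List.append_nil]
  have harr : r' - (i+1) + 1 = r' - i := by omega
  rw [harr]

theorem pvMi (pool : List Int) (r' : Nat) (s : List Int) (hs : s ∈ pvCombs pool 0 r') :
    ∀ j, j < r' → s.getD j 0 ≤ (j : Int) + (pool.length : Int) - (r' : Nat) := by
  obtain ⟨hl, hp, hb⟩ := (mem_pvCombs pool 0 r' s).mp hs
  intro j hj
  have hgap := pvGap s hp j (r' - 1 - j) (by omega)
  have hlast : s.getD (j + (r' - 1 - j)) 0 < (pool.length : Int) := by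
    have hmem : s.getD (j + (r' - 1 - j)) 0 ∈ s := by
      rw [List.getD_eq_getElem _ _ (by omega)]
      exact List.getElem_mem _
    exact (hb _ hmem).2
  have hc : ((r' - 1 - j : Nat) : Int) = (r' : Int) - 1 - (j : Int) := by push_cast; omega
  rw [hc] at hgap
  omega

theorem pvSucc_mem (pool : List Int) (r' i : Nat) (s : List Int)
    (hs : s ∈ pvCombs pool 0 r') (hi : i < r')
    (hne : s.getD i 0 ≠ (i : Int) + (pool.length : Int) - (r' : Nat)) :
    (s.take i ++ (List.range (r' - i)).map (fun q : Nat => s.getD i 0 + 1 + (q : Int))) ∈ pvCombs pool 0 r' := by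
  obtain ⟨hl, hp, hb⟩ := (mem_pvCombs pool 0 r' s).mp hs
  have hdle : s.getD i 0 ≤ (i : Int) + (pool.length : Int) - (r' : Nat) := pvMi pool r' s hs i hi
  have hdlt : s.getD i 0 < (i : Int) + (pool.length : Int) - (r' : Nat) := lt_of_le_of_ne hdle hne
  have hdmem : s.getD i 0 ∈ s := by
    rw [List.getD_eq_getElem _ _ (by omega)]
    exact List.getElem_mem _
  have hd0 : (0 : Int) ≤ s.getD i 0 := (hb _ hdmem).1
  refine (mem_pvCombs pool 0 r' _).mpr ⟨?_, ?_, ?_⟩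
  · rw [List.length_append, List.length_take, List.length_map, List.length_range]
    omega
  · rw [List.pairwise_append]
    refine ⟨hp.sublist (List.take_sublist _ _), ?_, ?_⟩
    · rw [List.pairwise_map]
      refine List.pairwise_lt_range.imp ?_
      intro a b hab
      push_cast
      omega
    · intro x hx y hy
      obtain ⟨j, hj, rfl⟩ := List.mem_take_iff_getElem.mp hx
      obtain ⟨q, hq, rfl⟩ := List.mem_map.mp hy
      have hji : j < i := by omega
      have hxi : s[j] < s.getD i 0 := by
        rw [List.getD_eq_getElem _ _ (by omega)]
        exact (List.pairwise_iff_getElem.mp hp) _ _ (by omega) (by omega) hji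
      omega
  · intro x hx
    rcases List.mem_append.mp hx with hx1 | hx2
    · obtain ⟨j, hj, rfl⟩ := List.mem_take_iff_getElem.mp hx1
      have : s[j] ∈ s := List.getElem_mem _
      exact hb _ this
    · obtain ⟨q, hq, rfl⟩ := List.mem_map.mp hx2
      rw [List.mem_range] at hq
      constructor
      · push_cast; omega
      · push_cast at hdlt ⊢
        omega

theorem pvSucc_gt (pool : List Int) (r' i : Nat) (s : List Int)
    (hs : s ∈ pvCombs pool 0 r') (hi : i < r') :
    s < s.take i ++ (List.range (r' - i)).map (fun q : Nat => s.getD i 0 + 1 + (q : Int)) := by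
  obtain ⟨hl, hp, hb⟩ := (mem_pvCombs pool 0 r' s).mp hs
  set M := (List.range (r' - i)).map (fun q : Nat => s.getD i 0 + 1 + (q : Int)) with hM
  have htk : (s.take i).length = i := by rw [List.length_take]; omega
  have hlen' : i < (s.take i ++ M).length := by
    rw [List.length_append, htk, hM, List.length_map, List.length_range]
    omega
  have hpre' : ∀ j, j < i → s.getD j 0 = (s.take i ++ M).getD j 0 := by
    intro j hj
    rw [List.getD_append (s.take i) _ _ _ (by rw [htk]; omega)]
    rw [List.getD_eq_getElem _ _ (by omega)]
    rw [List.getD_eq_getElem _ _ (by rw [htk]; omega)]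
    rw [List.getElem_take]
  have hstr' : s.getD i 0 < (s.take i ++ M).getD i 0 := by
    rw [List.getD_append_right (s.take i) _ _ _ (by rw [htk])]
    rw [htk, Nat.sub_self]
    have hblk : M.getD 0 0 = s.getD i 0 + 1 := by
      rw [hM, List.getD_eq_getElem _ _ (by rw [List.length_map, List.length_range]; omega)]
      simp only [List.getElem_map, List.getElem_range]
      push_cast
      ring
    rw [hblk]
    omega
  exact pvLt_intro _ _ i (by omega) hlen' hpre' hstr'

theorem pvSucc_min (pool : List Int) (r' i : Nat) (s : List Int)
    (hs : s ∈ pvCombs pool 0 r') (hi : i < r')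
    (hmax : ∀ j : Nat, i < j → j < r' → s.getD j 0 = (j : Int) + (pool.length : Int) - (r' : Nat))
    (t : List Int) (hts : t ∈ pvCombs pool 0 r') (hlt : s < t) :
    (s.take i ++ (List.range (r' - i)).map (fun q : Nat => s.getD i 0 + 1 + (q : Int))) = t ∨
    (s.take i ++ (List.range (r' - i)).map (fun q : Nat => s.getD i 0 + 1 + (q : Int))) < t := by
  obtain ⟨hl, hp, hb⟩ := (mem_pvCombs pool 0 r' s).mp hs
  obtain ⟨htl, htp, htb⟩ := (mem_pvCombs pool 0 r' t).mp hts
  set s' := s.take i ++ (List.range (r' - i)).map (fun q : Nat => s.getD i 0 + 1 + (q : Int)) with hs'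
  have hs'len : s'.length = r' := by
    rw [hs', List.length_append, List.length_take, List.length_map, List.length_range]
    omega
  have hs'pre : ∀ j, j < i → s'.getD j 0 = s.getD j 0 := by
    intro j hj
    rw [hs', List.getD_append (s.take i) _ _ _ (by simp [List.length_take]; omega)]
    rw [List.getD_eq_getElem _ _ (by simp [List.length_take]; omega)]
    rw [List.getElem_take]
    rw [List.getD_eq_getElem _ _ (by omega)]
  have hs'blk : ∀ j, i ≤ j → j < r' → s'.getD j 0 = s.getD i 0 + 1 + ((j - i : Nat) : Int) := by
    intro j h1 h2
    rw [hs', List.getD_append_right (s.take i) _ _ _ (by simp [List.length_take]; omega)]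
    rw [List.length_take, min_eq_left (by omega)]
    rw [List.getD_eq_getElem _ _ (by simp [List.length_map, List.length_range]; omega)]
    simp only [List.getElem_map, List.getElem_range]
  obtain ⟨p, hpl, hpre, hpstr⟩ := pvLt_elim s t (by omega) hlt
  rcases lt_trichotomy p i with hpi | hpi | hpi
  · -- first difference before i: s' still smaller there
    right
    apply pvLt_intro _ _ p (by omega) (by omega)
    · intro j hj
      rw [hs'pre j (by omega)]
      exact hpre j hj
    · rw [hs'pre p (by omega)]
      exact hpstr
  · -- first difference at i: s' is pointwise ≤ t
    subst hpi
    have hti : s.getD p 0 + 1 ≤ t.getD p 0 := by omega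
    apply pvLe_pointwise _ _ (by omega)
    intro j hj
    rw [hs'len] at hj
    rcases lt_or_ge j p with hj2 | hj2
    · rw [hs'pre j hj2, hpre j hj2]
    · rw [hs'blk j hj2 hj]
      have hgap := pvGap t htp p (j - p) (by omega)
      have : p + (j - p) = j := by omega
      rw [this] at hgap
      push_cast at hgap ⊢
      omega
  · -- first difference after i: impossible, s is maxed there
    exfalso
    have hmx := hmax p hpi (by omega)
    have hmi := pvMi pool r' t hts p (by omega)
    rw [hmx] at hpstr
    omega

theorem pvB_spec (pool : List Int) (r : Int) : ∀ (f : Nat) (start : Nat) (chosen : List Int),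
    pool.length - start ≤ f → (chosen.length : Int) ≤ r →
    pvB_rec pool r start chosen =
      (pvCombs pool start (r - chosen.length).toNat).flatMap
        (fun t => if pvGood pool chosen t then [1] else []) := by
  intro f
  induction f with
  | zero =>
    intro start chosen hf hle
    have hns : ¬ start < pool.length := by omega
    rw [pvB_rec]
    by_cases heq : (chosen.length : Int) = r
    · rw [if_pos heq]
      have h0 : (r - chosen.length).toNat = 0 := by omega
      rw [h0, pvCombs_zero]
      simp [pvGood]
    · rw [if_neg heq, dif_neg hns]
      have h0 : (r - chosen.length).toNat = (r - (chosen.length + 1)).toNat + 1 := by omega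
      rw [h0, pvCombs, dif_neg hns]
      simp
  | succ f ih =>
    intro start chosen hf hle
    rw [pvB_rec]
    by_cases heq : (chosen.length : Int) = r
    · rw [if_pos heq]
      have h0 : (r - chosen.length).toNat = 0 := by omega
      rw [h0, pvCombs_zero]
      simp [pvGood]
    · rw [if_neg heq]
      have hlt : (chosen.length : Int) < r := lt_of_le_of_ne hle heq
      have h0 : (r - chosen.length).toNat = (r - (chosen.length + 1)).toNat + 1 := by omega
      rw [h0, pvCombs]
      by_cases hsl : start < pool.length
      · rw [dif_pos hsl, dif_pos hsl]
        rw [List.flatMap_append]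
        have hv : pvVal pool (start : Int) = pool[start] := by
          rw [pvVal, PySem.List.pyGetD_natCast, List.getD_eq_getElem _ _ hsl]
        have hcons : ∀ t : List Int, pvGood pool chosen ((start : Int) :: t)
            = ((!chosen.contains pool[start]) && pvGood pool (chosen ++ [pool[start]]) t) := by
          intro t
          rw [pvGood, hv]
        have hmap : (List.map ((start : Int) :: ·) (pvCombs pool (start+1) (r - (chosen.length + 1)).toNat)).flatMap
              (fun t => if pvGood pool chosen t = true then [(1:Int)] else [])
            = (pvCombs pool (start+1) (r - (chosen.length + 1)).toNat).flatMap
              (fun t => if ((!chosen.contains pool[start]) && pvGood pool (chosen ++ [pool[start]]) t) = true then [(1 : Int)] else []) := by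
          rw [List.flatMap_map]
          apply List.flatMap_congr
          intro a _
          rw [hcons a]
        rw [hmap]
        have hrec2 : pvB_rec pool r (start+1) chosen
            = (pvCombs pool (start+1) ((r - (chosen.length + 1)).toNat + 1)).flatMap
              (fun t => if pvGood pool chosen t = true then [(1:Int)] else []) := by
          rw [ih (start+1) chosen (by omega) hle, h0]
        by_cases hc : chosen.contains pool[start]
        · rw [if_pos hc]
          have hz : ∀ t ∈ pvCombs pool (start+1) (r - (chosen.length + 1)).toNat,
              (if ((!chosen.contains pool[start]) && pvGood pool (chosen ++ [pool[start]]) t) = true then [(1:Int)] else []) = ([] : List Int) := by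
            intro t _
            rw [hc]
            simp
          rw [List.flatMap_congr hz]
          rw [hrec2]
          simp
        · rw [if_neg hc]
          have hcf : chosen.contains pool[start] = false := by simpa using hc
          have hrec1 : pvB_rec pool r (start+1) (chosen ++ [pool[start]])
              = (pvCombs pool (start+1) (r - (chosen.length + 1)).toNat).flatMap
                (fun t => if pvGood pool (chosen ++ [pool[start]]) t = true then [(1:Int)] else []) := by
            have harg : ((r : Int) - (((chosen ++ [pool[start]]).length : Nat) : Int)).toNat
                = (r - ((chosen.length : Int) + 1)).toNat := by
              simp
            have := ih (start+1) (chosen ++ [pool[start]]) (by omega) (by simp; omega)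
            rw [this, harg]
          rw [hrec1, hrec2]
          have hfix : ∀ t ∈ pvCombs pool (start+1) (r - (chosen.length + 1)).toNat,
              (if ((!chosen.contains pool[start]) && pvGood pool (chosen ++ [pool[start]]) t) = true then [(1:Int)] else [])
              = (if pvGood pool (chosen ++ [pool[start]]) t = true then [(1:Int)] else []) := by
            intro t _
            rw [hcf]
            simp
          rw [List.flatMap_congr hfix]
      · rw [dif_neg hsl, dif_neg hsl]
        simp

theorem pvLoop_spec (pool : List Int) (r' : Nat) :
    ∀ (post pre : List (List Int)) (s : List Int) (fuel : Nat),
      pvCombs pool 0 r' = pre ++ s :: post → post.length < fuel →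
      (if PySem.Set.len (pvA_yt pool PySem.Set.empty s) = ((r' : Nat) : Int) then [1] else []) ++
          pvA_loop pool ((pool.length : Nat) : Int) ((r' : Nat) : Int) s fuel =
        (s :: post).flatMap (fun t => if pvGood pool [] t = true then [(1 : Int)] else []) := by
  intro post
  induction post with
  | nil =>
    intro pre s fuel hdec hfuel
    have hsmem : s ∈ pvCombs pool 0 r' := by rw [hdec]; simp
    have hslen : s.length = r' := ((mem_pvCombs pool 0 r' s).mp hsmem).1
    obtain ⟨fuel', rfl⟩ : ∃ k, fuel = k + 1 := ⟨fuel - 1, by omega⟩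
    rw [pvA_loop, pvFind_eq_hfind]
    cases hf : pvHFind s ((pool.length : Nat) : Int) ((r' : Nat) : Int) r' with
    | none =>
      rw [if_congr (pvCond_iff pool s r' hslen) rfl rfl]
      simp
    | some i =>
      exfalso
      obtain ⟨i', rfl, hi', hne0, hmax0⟩ := pvHFind_some s _ _ r' i hf
      have hne : s.getD i' 0 ≠ (i' : Int) + (pool.length : Int) - ((r' : Nat) : Int) := by
        rwa [PySem.List.pyGetD_natCast] at hne0
      have hmem' := pvSucc_mem pool r' i' s hsmem hi' hne
      have hgt := pvSucc_gt pool r' i' s hsmem hi'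
      rw [hdec] at hmem'
      rcases List.mem_append.mp hmem' with hp1 | hp2
      · have hsorted := pvCombs_sorted pool 0 r'
        rw [hdec] at hsorted
        have hlt := (List.pairwise_append.mp hsorted).2.2 _ hp1 s (by simp)
        exact absurd (lt_trans hlt hgt) (lt_irrefl _)
      · have heq := List.mem_singleton.mp hp2
        rw [heq] at hgt
        exact absurd hgt (lt_irrefl _)
  | cons h post' ih =>
    intro pre s fuel hdec hfuel
    have hsmem : s ∈ pvCombs pool 0 r' := by rw [hdec]; simp
    have hslen : s.length = r' := ((mem_pvCombs pool 0 r' s).mp hsmem).1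
    have hhmem : h ∈ pvCombs pool 0 r' := by rw [hdec]; simp
    have hhlen : h.length = r' := ((mem_pvCombs pool 0 r' h).mp hhmem).1
    have hsorted := pvCombs_sorted pool 0 r'
    rw [hdec] at hsorted
    have htailp := (List.pairwise_append.mp hsorted).2.1
    have hsh : s < h := (List.pairwise_cons.mp htailp).1 h (by simp)
    obtain ⟨fuel', rfl⟩ : ∃ k, fuel = k + 1 := ⟨fuel - 1, by omega⟩
    rw [pvA_loop, pvFind_eq_hfind]
    cases hf : pvHFind s ((pool.length : Nat) : Int) ((r' : Nat) : Int) r' with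
    | none =>
      exfalso
      have hmax := pvHFind_none s _ _ r' hf
      have hle := pvLe_pointwise h s (by omega) ?_
      · rcases hle with heq | hlt
        · rw [heq] at hsh; exact absurd hsh (lt_irrefl _)
        · exact absurd (lt_trans hsh hlt) (lt_irrefl _)
      · intro j hj
        rw [hhlen] at hj
        have h1 := pvMi pool r' h hhmem j hj
        have h2 := hmax j hj
        rw [PySem.List.pyGetD_natCast] at h2
        rw [h2]
        exact h1
    | some i =>
      obtain ⟨i', rfl, hi', hne0, hmax0⟩ := pvHFind_some s _ _ r' i hf
      have hne : s.getD i' 0 ≠ (i' : Int) + (pool.length : Int) - ((r' : Nat) : Int) := by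
        rwa [PySem.List.pyGetD_natCast] at hne0
      have hmaxN : ∀ j : Nat, i' < j → j < r' →
          s.getD j 0 = (j : Int) + (pool.length : Int) - ((r' : Nat) : Int) := by
        intro j h1 h2
        have := hmax0 j h1 h2
        rwa [PySem.List.pyGetD_natCast] at this
      have hmem' := pvSucc_mem pool r' i' s hsmem hi' hne
      have hgt := pvSucc_gt pool r' i' s hsmem hi'
      have hmin := pvSucc_min pool r' i' s hsmem hi' hmaxN h hhmem hsh
      have hseq : s.take i' ++ (List.range (r' - i')).map (fun q : Nat => s.getD i' 0 + 1 + (q : Int)) = h := by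
        rcases hmin with he | hlt2
        · exact he
        · exfalso
          rw [hdec] at hmem'
          rcases List.mem_append.mp hmem' with hp1 | hp2
          · have hlt := (List.pairwise_append.mp hsorted).2.2 _ hp1 s (by simp)
            exact absurd (lt_trans hlt hgt) (lt_irrefl _)
          · rcases List.mem_cons.mp hp2 with he2 | hp3
            · rw [he2] at hgt
              exact absurd hgt (lt_irrefl _)
            · rcases List.mem_cons.mp hp3 with he3 | hp4
              · rw [he3] at hlt2
                exact absurd hlt2 (lt_irrefl _)
              · have hhp : h < s.take i' ++ (List.range (r' - i')).map (fun q : Nat => s.getD i' 0 + 1 + (q : Int)) :=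
                  (List.pairwise_cons.mp (List.pairwise_cons.mp htailp).2).1 _ hp4
                exact absurd (lt_trans hlt2 hhp) (lt_irrefl _)
      dsimp only
      rw [pvStep_spec s r' i' hslen hi', hseq]
      rw [List.flatMap_cons]
      rw [← ih (pre ++ [s]) h fuel' (by rw [hdec]; simp) (by simp at hfuel; omega)]
      rw [if_congr (pvCond_iff pool s r' hslen) rfl rfl]

theorem pvMain (iterable : List Int) (r : Int) :
    combinations iterable r = combinations_alt iterable r := by
  rw [combinations, combinations_alt]
  by_cases hgt : r > (iterable.length : Int)
  · rw [if_pos hgt, if_pos (Or.inr hgt)]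
  · rw [if_neg hgt]
    by_cases hneg : r < 0
    · rw [if_pos (Or.inl hneg)]
      have hnil : PySem.List.pyRange 0 r 1 = [] := PySem.List.pyRange_one_eq_nil (by omega)
      rw [hnil]
      have hyt : pvA_yt iterable PySem.Set.empty [] = PySem.Set.empty := by rw [pvA_yt]
      rw [hyt]
      have hlen0 : PySem.Set.len (PySem.Set.empty : PySem.Set Int) = 0 := by
        simp [PySem.Set.len, PySem.Set.empty]
      dsimp only
      rw [hlen0, if_neg (by omega)]
      obtain ⟨k, hk⟩ : ∃ k, 2 ^ iterable.length = k + 1 :=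
        ⟨2 ^ iterable.length - 1, by have := Nat.one_le_two_pow (n := iterable.length); omega⟩
      rw [hk, pvA_loop, pvA_find, hnil]
      simp
    · rw [if_neg (by omega)]
      have hr0 : 0 ≤ r := by omega
      set r' := r.toNat with hr'
      have hr : r = ((r' : Nat) : Int) := by omega
      have hrlen : r' ≤ iterable.length := by omega
      -- B side
      have hB : pvB_rec iterable r 0 [] =
          (pvCombs iterable 0 r').flatMap (fun t => if pvGood iterable [] t = true then [(1:Int)] else []) := by
        have hBs := pvB_spec iterable r iterable.length 0 [] (by omega) (by simp; omega)
        have harg : (r - (([] : List Int).length : Int)).toNat = r' := by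
          simp only [List.length_nil, Nat.cast_zero, sub_zero]
          omega
        rw [hBs, harg]
      -- A side: the initial tuple heads pvCombs
      have hs0mem : PySem.List.pyRange 0 r 1 ∈ pvCombs iterable 0 r' := by
        refine (mem_pvCombs iterable 0 r' _).mpr ⟨?_, ?_, ?_⟩
        · rw [PySem.List.length_pyRange_one]; omega
        · exact PySem.List.pairwise_lt_pyRange_one 0 r
        · intro x hx
          have := PySem.List.mem_pyRange_one.mp hx
          constructor
          · push_cast; omega
          · omega
      have hs0len : (PySem.List.pyRange 0 r 1).length = r' := by
        rw [PySem.List.length_pyRange_one]; omega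
      have hs0get : ∀ j, j < r' → (PySem.List.pyRange 0 r 1).getD j 0 = (j : Int) := by
        intro j hj
        rw [List.getD_eq_getElem _ _ (by omega)]
        rw [PySem.List.getElem_pyRange_one]
        ring
      obtain ⟨post, hdec⟩ : ∃ post, pvCombs iterable 0 r' = [] ++ PySem.List.pyRange 0 r 1 :: post := by
        cases hcc : pvCombs iterable 0 r' with
        | nil => rw [hcc] at hs0mem; simp at hs0mem
        | cons c rest =>
          have hcmem : c ∈ pvCombs iterable 0 r' := by rw [hcc]; simp
          have hclen : c.length = r' := ((mem_pvCombs iterable 0 r' c).mp hcmem).1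
          have hcp := ((mem_pvCombs iterable 0 r' c).mp hcmem).2.1
          have hcb := ((mem_pvCombs iterable 0 r' c).mp hcmem).2.2
          have hmin : ∀ j, j < r' → (j : Int) ≤ c.getD j 0 := by
            intro j hj
            have hg := pvGap c hcp 0 j (by omega)
            have h0m : c.getD 0 0 ∈ c := by
              rw [List.getD_eq_getElem _ _ (by omega)]
              exact List.getElem_mem _
            have hge0 := (hcb _ h0m).1
            rw [Nat.zero_add] at hg
            push_cast at hge0
            omega
          have hle := pvLe_pointwise (PySem.List.pyRange 0 r 1) c (by omega) ?_
          · rcases hle with heq | hlt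
            · exact ⟨rest, by rw [← heq]; simp⟩
            · exfalso
              rw [hcc] at hs0mem
              rcases List.mem_cons.mp hs0mem with he | hrest
              · rw [he] at hlt; exact absurd hlt (lt_irrefl _)
              · have hsorted := pvCombs_sorted iterable 0 r'
                rw [hcc] at hsorted
                have := (List.pairwise_cons.mp hsorted).1 _ hrest
                exact absurd (lt_trans this hlt) (lt_irrefl _)
          · intro j hj
            rw [hs0len] at hj
            rw [hs0get j hj]
            exact hmin j hj
      have hfuel : post.length < 2 ^ iterable.length := by
        have htot := pvCombs_len_le iterable 0 r'
        rw [hdec] at htot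
        simp at htot
        omega
      have hloop := pvLoop_spec iterable r' post [] (PySem.List.pyRange 0 r 1) (2 ^ iterable.length) hdec hfuel
      rw [hr] at hloop hB hdec
      rw [hr]
      dsimp only
      rw [hloop, hB, hdec]
      simp

-- ===== VERDICT (by name: the statement is the Claim_ definition above) =====
theorem combinations_spec : Claim_equal_combinations := by
  intro iterable r _
  unfold Spec_combinations
  exact pvMain iterable r
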